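-- pv_equiv track=rewrite | github.com/michelleblom/rairepy | raire_utils.py | vote_for_cand
-- ===== SOURCE A (Python) =====
-- def ranking(cand, ballot):
--     '''
--     Input:
--         cand           -   identifier for candidate
--         ballot         -   mapping between candidate name and their
--                            position in the ranking for a relevant contest
--                            on a given ballot.
--
--     Output:
--         Returns the position of candidate 'cand' in the ranking of the
--         given ballot 'ballot'. Returns -1 if 'cand' is not preferenced on the
--         ballot.
--     '''
--     if not cand in ballot: return -1
--
--     return ballot[cand]
--
-- def vote_for_cand(cand, eliminated, ballot):
--     '''
--     Input:
--         cand                -   identifier for candidate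
--         eliminated : list   -   identifiers of eliminated candidates
--         ballot              -   mapping between candidate name and their
--                                 position in the ranking for a relevant contest
--                                 on a given ballot.
--     Output:
--         Returns 1 if the given 'ballot' is a vote for the given candidate 'cand'
--         in the context where candidates in 'eliminated' have been eliminated.
--         Otherwise, return 0 as the 'ballot' is not a vote for 'cand'.
--     '''
--
--     # If 'cand' is not in the set of candidates assumed still standing,
--     # 'cand' does not get this vote.
--     if cand in eliminated: return 0
--
--     # If 'cand' does not appear on the ballot, they do not get this vote.
--     c_idx = ranking(cand, ballot)
--     if c_idx == -1: return 0
--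
--     for alt_c,a_idx in ballot.items():
--         if alt_c == cand:
--             continue
--
--         if alt_c in eliminated:
--             continue
--
--         if a_idx < c_idx:
--             return 0
--
--     return 1
-- ===== SOURCE B (Python) =====
-- def vote_for_cand(cand, eliminated, ballot):
--     elim = set(eliminated)
--     if cand in elim:
--         return 0
--     c_idx = ballot.get(cand, -1)
--     if c_idx == -1:
--         return 0
--     ranks = sorted([i for c, i in ballot.items() if c != cand and c not in elim] + [c_idx])
--     return int(ranks[0] == c_idx)
-- ===== Notes on version B (the rewrite author's own statement) =====
-- stated objective: alternative
-- what changed: Replaces A's early-exit scan (plus the helper 'ranking') with a sort-based formulation: collect the ranks of the other standing candidates, append cand's own rank, sort, and cand gets the vote iff the head of the sorted list equals cand's rank.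
import Mathlib
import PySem

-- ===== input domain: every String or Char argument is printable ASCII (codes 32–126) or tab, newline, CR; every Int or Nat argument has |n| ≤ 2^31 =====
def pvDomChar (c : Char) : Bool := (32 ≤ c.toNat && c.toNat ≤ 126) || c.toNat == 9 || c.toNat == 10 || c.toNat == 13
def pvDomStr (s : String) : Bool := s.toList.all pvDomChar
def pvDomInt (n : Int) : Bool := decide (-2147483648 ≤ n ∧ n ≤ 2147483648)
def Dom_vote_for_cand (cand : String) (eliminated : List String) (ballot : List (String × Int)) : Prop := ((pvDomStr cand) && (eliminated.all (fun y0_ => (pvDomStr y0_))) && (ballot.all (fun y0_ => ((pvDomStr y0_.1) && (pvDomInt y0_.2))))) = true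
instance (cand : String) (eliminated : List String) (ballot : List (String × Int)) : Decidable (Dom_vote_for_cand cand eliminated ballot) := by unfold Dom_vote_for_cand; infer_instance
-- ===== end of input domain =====

-- B replaces A's early-exit scan with a sort-based formulation: sort the standing
-- ranks (with cand's own rank appended) and check the head (same result, O(n log n)).

-- ===== PORT A =====
-- helper 'ranking': ballot[cand] if present (first match), else -1
def pyRanking (cand : String) (ballot : List (String × Int)) : Int :=
  match ballot.find? (fun p => p.1 == cand) with
  | none => -1
  | some p => p.2

-- the 'for alt_c, a_idx in ballot.items(): …' loop with its early return
def voteForCandLoop (cand : String) (eliminated : List String) (c_idx : Int) :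
    List (String × Int) → Int
  | [] => 1
  | (alt_c, a_idx) :: rest =>
    if alt_c == cand then voteForCandLoop cand eliminated c_idx rest
    else if eliminated.contains alt_c then voteForCandLoop cand eliminated c_idx rest
    else if a_idx < c_idx then 0
    else voteForCandLoop cand eliminated c_idx rest

def vote_for_cand (cand : String) (eliminated : List String) (ballot : List (String × Int)) : Int :=
  if eliminated.contains cand then 0
  else
    let c_idx := pyRanking cand ballot
    if c_idx = -1 then 0
    else voteForCandLoop cand eliminated c_idx ballot

-- ===== PORT B =====
def vote_for_cand_alt (cand : String) (eliminated : List String) (ballot : List (String × Int)) : Int :=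
  if eliminated.contains cand then 0
  else
    let c_idx := match ballot.find? (fun p => p.1 == cand) with  -- ballot.get(cand, -1)
                 | none => (-1 : Int)
                 | some p => p.2
    if c_idx = -1 then 0
    else
      -- ranks = sorted([i for c,i in ballot.items() if c != cand and c not in elim] + [c_idx])
      let ranks := PySem.List.sorted
        (((ballot.filter (fun p => !(p.1 == cand) && !(eliminated.contains p.1))).map Prod.snd)
          ++ [c_idx]) (fun x => x) false
      match ranks with
      | [] => 0            -- unreachable: ranks contains c_idx, so it is never empty
      | r :: _ => if r = c_idx then 1 else 0   -- int(ranks[0] == c_idx)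

-- ===== PRECONDITION & SPEC =====
def Spec_vote_for_cand (cand : String) (eliminated : List String) (ballot : List (String × Int)) (out : Int) : Prop := out = vote_for_cand_alt cand eliminated ballot
instance (cand : String) (eliminated : List String) (ballot : List (String × Int)) (out : Int) : Decidable (Spec_vote_for_cand cand eliminated ballot out) := by unfold Spec_vote_for_cand; infer_instance

-- ===== CLAIM (what is proved, stated in full; the proofs are below) =====
def Claim_equal_vote_for_cand : Prop := ∀ (cand : String) (eliminated : List String) (ballot : List (String × Int)), Dom_vote_for_cand cand eliminated ballot → Spec_vote_for_cand cand eliminated ballot (vote_for_cand cand eliminated ballot)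

-- ===== LEMMAS AND PROOFS =====
-- A's loop returns 1 iff every other standing candidate's rank on the ballot is ≥ c_idx
theorem voteForCandLoop_eq (cand : String) (eliminated : List String) (c_idx : Int) :
    ∀ bs : List (String × Int),
      voteForCandLoop cand eliminated c_idx bs =
        (if bs.all (fun p => (p.1 == cand) || eliminated.contains p.1 || decide (c_idx ≤ p.2))
          then 1 else 0) := by
  intro bs
  induction bs with
  | nil => simp [voteForCandLoop]
  | cons hd tl ih =>
    obtain ⟨alt_c, a_idx⟩ := hd
    simp only [voteForCandLoop, ih, List.all_cons]
    by_cases h1 : (alt_c == cand) = true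
    · simp only [h1]
      cases htl : (tl.all fun p => p.1 == cand || eliminated.contains p.1 || decide (c_idx ≤ p.2)) <;> simp [htl]
    · rw [Bool.not_eq_true] at h1
      by_cases h2 : eliminated.contains alt_c = true
      · simp only [h1, h2]
        cases htl : (tl.all fun p => p.1 == cand || eliminated.contains p.1 || decide (c_idx ≤ p.2)) <;> simp [htl]
      · rw [Bool.not_eq_true] at h2
        by_cases h3 : a_idx < c_idx
        · have h4 : decide (c_idx ≤ a_idx) = false := by simp; omega
          simp only [h1, h2, h4]
          cases htl : (tl.all fun p => p.1 == cand || eliminated.contains p.1 || decide (c_idx ≤ p.2)) <;> simp [htl, h3]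
        · have h4 : decide (c_idx ≤ a_idx) = true := by simp; omega
          simp only [h1, h2, h4]
          cases htl : (tl.all fun p => p.1 == cand || eliminated.contains p.1 || decide (c_idx ≤ p.2)) <;> simp [htl, h3]

-- head of sorted (others ++ [c_idx]) is c_idx iff c_idx is ≤ every element of others
theorem head_sorted_append_eq_iff (c_idx : Int) (others : List Int) (r : Int) (t : List Int)
    (h : PySem.List.sorted (others ++ [c_idx]) (fun x => x) false = r :: t) :
    (r = c_idx) ↔ (∀ x ∈ others, c_idx ≤ x) := by
  have hmemall : ∀ y ∈ others ++ [c_idx], r ≤ y := PySem.List.key_head_sorted_le _ _ h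
  have hr_mem : r ∈ others ++ [c_idx] := by
    have : r ∈ PySem.List.sorted (others ++ [c_idx]) (fun x => x) false := by
      rw [h]; exact List.mem_cons_self
    exact (PySem.List.mem_sorted _ _ _ _).mp this
  have hrle : r ≤ c_idx := hmemall c_idx (by simp)
  constructor
  · intro hre x hx
    rw [← hre]; exact hmemall x (List.mem_append_left _ hx)
  · intro hall
    have : c_idx ≤ r := by
      rcases List.mem_append.mp hr_mem with h1 | h1
      · exact hall r h1
      · simp at h1; omega
    omega

-- ===== VERDICT (by name: the statement is the Claim_ definition above) =====
theorem vote_for_cand_spec : Claim_equal_vote_for_cand := by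
  intro cand eliminated ballot _
  unfold Spec_vote_for_cand vote_for_cand vote_for_cand_alt
  have hr : (match ballot.find? (fun p => p.1 == cand) with
             | none => (-1 : Int)
             | some p => p.2) = pyRanking cand ballot := rfl
  by_cases he : eliminated.contains cand = true
  · rw [if_pos he, if_pos he]
  · rw [if_neg he, if_neg he]
    simp only [hr]
    by_cases hidx : pyRanking cand ballot = -1
    · rw [if_pos hidx, if_pos hidx]
    · rw [if_neg hidx, if_neg hidx, voteForCandLoop_eq]
      set c_idx := pyRanking cand ballot with hc
      set others := (ballot.filter (fun p => !(p.1 == cand) && !(eliminated.contains p.1))).map Prod.snd with ho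
      cases hs : PySem.List.sorted (others ++ [c_idx]) (fun x => x) false with
      | nil =>
        exact absurd ((PySem.List.sorted_eq_nil_iff _ _ _).mp hs) (by simp)
      | cons r t =>
        have key :
            (ballot.all (fun p => (p.1 == cand) || eliminated.contains p.1 ||
                decide (c_idx ≤ p.2)) = true) ↔ (r = c_idx) := by
          rw [head_sorted_append_eq_iff c_idx others r t hs, List.all_eq_true]
          constructor
          · intro hall x hx
            rw [ho] at hx
            simp only [List.mem_map, List.mem_filter, Bool.and_eq_true, Bool.not_eq_true'] at hx
            obtain ⟨p, ⟨hp, hc1, hc2⟩, rfl⟩ := hx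
            have := hall p hp
            rw [hc1, hc2] at this
            simpa using this
          · intro hmin p hp
            cases hc1 : (p.1 == cand) with
            | true => simp
            | false =>
              cases hc2 : eliminated.contains p.1 with
              | true => simp
              | false =>
                have : p.2 ∈ others := by
                  rw [ho]
                  simp only [List.mem_map, List.mem_filter, Bool.and_eq_true, Bool.not_eq_true']
                  exact ⟨p, ⟨hp, hc1, hc2⟩, rfl⟩
                have := hmin p.2 this
                simp [this]
        by_cases hall : ballot.all (fun p => (p.1 == cand) || eliminated.contains p.1 ||
            decide (c_idx ≤ p.2)) = true
        · rw [if_pos hall]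
          simp [key.mp hall]
        · have hne : r ≠ c_idx := fun h => hall (key.mpr h)
          rw [if_neg hall]
          simp [hne]
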